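-- pv_equiv track=rewrite | github.com/RyanMFDR/KNN_Sentiment-Analysis | scripts/preprocess.py | try_split_word
-- ===== SOURCE A (Python) =====
-- def try_split_word(word, known_words):
--     splits = []
--     i = 0
--     while i < len(word):
--         found = False
--         for j in range(len(word), i, -1):
--             if word[i:j] in known_words:
--                 splits.append(word[i:j])
--                 i = j
--                 found = True
--                 break
--         if not found:
--             return None
--     return splits
-- ===== SOURCE B (Python) =====
-- def try_split_word(word, known_words):
--     # Greedy longest-match split, but at each position scan the DICTIONARY
--     # (startswith at offset) for the longest matching word, instead of testing
--     # every substring of the remaining text for list membership.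
--     splits = []
--     i = 0
--     n = len(word)
--     while i < n:
--         best = 0
--         for kw in known_words:
--             if len(kw) > best and word.startswith(kw, i):
--                 best = len(kw)
--         if best == 0:
--             return None
--         splits.append(word[i:i + best])
--         i += best
--     return splits
-- ===== Notes on version B (the rewrite author's own statement) =====
-- stated objective: faster
-- what changed: At each position B scans the dictionary once with startswith-at-offset keeping the longest match, instead of A's descending scan over all remaining substring lengths with a full list-membership test per length.
import Mathlib
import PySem

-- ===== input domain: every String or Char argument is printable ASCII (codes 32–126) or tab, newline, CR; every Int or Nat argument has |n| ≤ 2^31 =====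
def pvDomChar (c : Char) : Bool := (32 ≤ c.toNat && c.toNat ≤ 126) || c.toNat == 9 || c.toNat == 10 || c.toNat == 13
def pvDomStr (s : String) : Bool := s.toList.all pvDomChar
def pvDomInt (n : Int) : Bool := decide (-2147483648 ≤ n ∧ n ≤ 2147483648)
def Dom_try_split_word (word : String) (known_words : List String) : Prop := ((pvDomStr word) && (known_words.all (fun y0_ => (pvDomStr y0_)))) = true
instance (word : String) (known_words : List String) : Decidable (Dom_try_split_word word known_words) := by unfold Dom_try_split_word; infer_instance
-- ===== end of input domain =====

-- B replaces A's per-position descending substring-membership scans by a single pass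
-- over the dictionary keeping the longest match at each position (objective: faster).

-- ===== PORT A =====
-- inner loop of A: `for j in range(len(word), i, -1): if word[i:j] in known_words: … break`
-- (range with step -1 ported by hand as an explicit countdown; exact for the Nat-valued i, j it is called with)
def tswFindA (w : List Char) (known : List String) (i : Nat) (j : Nat) : Option Nat :=
  if _h : i < j then
    if known.contains (String.ofList (PySem.List.slice w (some (i : Int)) (some (j : Int)))) then
      some j
    else
      tswFindA w known i (j - 1)
  else none
termination_by j

-- cited by tswLoopA's decreasing_by
theorem tswFindA_gt {w : List Char} {known : List String} {i j m : Nat}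
    (h : tswFindA w known i j = some m) : i < m := by
  induction j using Nat.strong_induction_on with
  | _ j ih =>
    unfold tswFindA at h
    split at h
    · split at h
      · cases h; assumption
      · exact ih (j - 1) (by omega) h
    · exact absurd h (by simp)

-- the while loop of A, carrying (i, splits)
def tswLoopA (w : List Char) (known : List String) (i : Nat) (splits : List String) :
    Option (List String) :=
  if _h : i < w.length then
    match hf : tswFindA w known i w.length with
    | some j =>
        tswLoopA w known j
          (splits ++ [String.ofList (PySem.List.slice w (some (i : Int)) (some (j : Int)))])
    | none => none
  else some splits
termination_by w.length - i
decreasing_by have := tswFindA_gt hf; omega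

def try_split_word (word : String) (known_words : List String) : Option (List String) :=
  tswLoopA word.toList known_words 0 []

-- ===== PORT B =====
-- inner loop of B: `for kw in known_words: if len(kw) > best and word.startswith(kw, i): best = len(kw)`
-- (str.startswith(kw, i) ported as a prefix test on the drop; exact for 0 ≤ i ≤ len(word))
def tswBestB (w : List Char) (known : List String) (i : Nat) : Nat :=
  known.foldl
    (fun best kw =>
      if kw.toList.length > best && PySem.Chars.startswith (w.drop i) kw.toList then
        kw.toList.length
      else best)
    0

-- the while loop of B, carrying (i, splits)
def tswLoopB (w : List Char) (known : List String) (i : Nat) (splits : List String) :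
    Option (List String) :=
  if _h : i < w.length then
    let best := tswBestB w known i
    if _hb : best = 0 then none
    else
      tswLoopB w known (i + best)
        (splits ++ [String.ofList (PySem.List.slice w (some (i : Int)) (some ((i + best : Nat) : Int)))])
  else some splits
termination_by w.length - i
decreasing_by omega

def try_split_word_alt (word : String) (known_words : List String) : Option (List String) :=
  tswLoopB word.toList known_words 0 []

-- ===== PRECONDITION & SPEC =====
def Spec_try_split_word (word : String) (known_words : List String) (out : Option (List String)) : Prop := out = try_split_word_alt word known_words
instance (word : String) (known_words : List String) (out : Option (List String)) : Decidable (Spec_try_split_word word known_words out) := by unfold Spec_try_split_word; infer_instance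

-- ===== CLAIM (what is proved, stated in full; the proofs are below) =====
def Claim_equal_try_split_word : Prop := ∀ (word : String) (known_words : List String), Dom_try_split_word word known_words → Spec_try_split_word word known_words (try_split_word word known_words)

-- ===== LEMMAS AND PROOFS =====

-- "some known word of length k matches at position i"
def tswM (w : List Char) (known : List String) (i k : Nat) : Bool :=
  known.contains (String.ofList ((w.drop i).take k))

theorem slice_contains_eq (w : List Char) (known : List String) (i j : Nat) :
    known.contains (String.ofList (PySem.List.slice w (some (i : Int)) (some (j : Int))))
      = tswM w known i (j - i) := by
  rw [PySem.List.slice_natCast, tswM]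

-- characterization of B's inner fold: it computes the largest matching length (0 if none)
theorem tswBestB_foldl_char (w : List Char) (i : Nat) (l : List String) (acc : Nat) :
    acc ≤ l.foldl (fun best kw =>
        if kw.toList.length > best && PySem.Chars.startswith (w.drop i) kw.toList then
          kw.toList.length else best) acc ∧
    (l.foldl (fun best kw =>
        if kw.toList.length > best && PySem.Chars.startswith (w.drop i) kw.toList then
          kw.toList.length else best) acc = acc ∨
      ∃ kw ∈ l, kw.toList.length = l.foldl (fun best kw =>
        if kw.toList.length > best && PySem.Chars.startswith (w.drop i) kw.toList then
          kw.toList.length else best) acc ∧ kw.toList <+: (w.drop i)) ∧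
    (∀ kw ∈ l, kw.toList <+: (w.drop i) → kw.toList.length ≤ l.foldl (fun best kw =>
        if kw.toList.length > best && PySem.Chars.startswith (w.drop i) kw.toList then
          kw.toList.length else best) acc) := by
  induction l generalizing acc with
  | nil => simp
  | cons kw t ih =>
    simp only [List.foldl_cons]
    by_cases hc : (kw.toList.length > acc && PySem.Chars.startswith (w.drop i) kw.toList) = true
    · rw [if_pos hc]
      obtain ⟨hgt, hpre⟩ := Bool.and_eq_true_iff.mp hc
      have hgt' : kw.toList.length > acc := of_decide_eq_true hgt
      have hpre' : kw.toList <+: (w.drop i) := (PySem.Chars.startswith_iff _ _).mp hpre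
      obtain ⟨h1, h2, h3⟩ := ih kw.toList.length
      refine ⟨by omega, ?_, ?_⟩
      · rcases h2 with h2 | ⟨kw', hm, hl, hp⟩
        · exact Or.inr ⟨kw, List.mem_cons_self, h2.symm ▸ rfl, hpre'⟩
        · exact Or.inr ⟨kw', List.mem_cons_of_mem _ hm, hl, hp⟩
      · intro kw' hm hp
        rcases List.mem_cons.mp hm with rfl | hm
        · exact h1
        · exact h3 kw' hm hp
    · rw [if_neg hc]
      obtain ⟨h1, h2, h3⟩ := ih acc
      refine ⟨h1, ?_, ?_⟩
      · rcases h2 with h2 | h2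
        · exact Or.inl h2
        · obtain ⟨kw', hm, hl, hp⟩ := h2
          exact Or.inr ⟨kw', List.mem_cons_of_mem _ hm, hl, hp⟩
      · intro kw' hm hp
        rcases List.mem_cons.mp hm with rfl | hm
        · have hns : ¬ (kw'.toList.length > acc ∧
              PySem.Chars.startswith (w.drop i) kw'.toList = true) := by
            rintro ⟨a, b⟩; exact hc (Bool.and_eq_true_iff.mpr ⟨decide_eq_true a, b⟩)
          have hsw := (PySem.Chars.startswith_iff (w.drop i) kw'.toList).mpr hp
          by_cases hgt : kw'.toList.length > acc
          · exact absurd ⟨hgt, hsw⟩ hns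
          · omega
        · exact h3 kw' hm hp

theorem tswM_iff (w : List Char) (known : List String) (i k : Nat)
    (hk : k ≤ (w.drop i).length) :
    tswM w known i k = true ↔
      ∃ kw ∈ known, kw.toList.length = k ∧ kw.toList <+: (w.drop i) := by
  rw [tswM, List.contains_iff_mem]
  constructor
  · intro hmem
    refine ⟨String.ofList ((w.drop i).take k), hmem, ?_, ?_⟩
    · rw [String.toList_ofList, List.length_take]; omega
    · rw [String.toList_ofList]; exact List.take_prefix _ _
  · rintro ⟨kw, hm, hl, hp⟩
    have : kw.toList = (w.drop i).take k := by
      rw [← hl]; exact List.prefix_iff_eq_take.mp hp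
    rw [← this, String.ofList_toList]; exact hm

-- A's inner search returns none when nothing matches
theorem tswFindA_none (w : List Char) (known : List String) (i : Nat) :
    ∀ j, (∀ k, i < k → k ≤ j → tswM w known i (k - i) = false) →
      tswFindA w known i j = none := by
  intro j
  induction j using Nat.strong_induction_on with
  | _ j ih =>
    intro hno
    unfold tswFindA
    split
    · rw [slice_contains_eq, hno j (by omega) le_rfl]
      simp only [Bool.false_eq_true, if_false]
      exact ih (j - 1) (by omega) (fun k hk hk' => hno k hk (by omega))
    · rfl

-- A's inner search returns the largest match when one exists
theorem tswFindA_finds (w : List Char) (known : List String) (i m : Nat)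
    (him : i < m) (hM : tswM w known i (m - i) = true) :
    ∀ j, m ≤ j → (∀ k, m < k → k ≤ j → tswM w known i (k - i) = false) →
      tswFindA w known i j = some m := by
  intro j
  induction j using Nat.strong_induction_on with
  | _ j ih =>
    intro hmj hno
    unfold tswFindA
    rw [dif_pos (by omega)]
    by_cases hjm : j = m
    · subst hjm; rw [slice_contains_eq, hM]; simp
    · rw [slice_contains_eq, hno j (by omega) le_rfl]
      simp only [Bool.false_eq_true, if_false]
      exact ih (j - 1) (by omega) (by omega) (fun k hk hk' => hno k hk (by omega))

-- the key bridge: A's inner search agrees with B's inner fold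
theorem find_eq_best (w : List Char) (known : List String) (i : Nat) (hi : i < w.length) :
    tswFindA w known i w.length =
      (if tswBestB w known i = 0 then none else some (i + tswBestB w known i)) := by
  obtain ⟨-, h2, h3⟩ := tswBestB_foldl_char w i known 0
  have hfold : known.foldl (fun best kw =>
      if kw.toList.length > best && PySem.Chars.startswith (w.drop i) kw.toList then
        kw.toList.length else best) 0 = tswBestB w known i := rfl
  rw [hfold] at h2 h3
  by_cases hb : tswBestB w known i = 0
  · rw [if_pos hb]
    apply tswFindA_none
    intro k hk hk'
    by_contra hM
    have hM' : tswM w known i (k - i) = true := by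
      cases h : tswM w known i (k - i) with
      | false => exact absurd h hM
      | true => rfl
    obtain ⟨kw, hm, hl, hp⟩ := (tswM_iff w known i (k - i)
      (by rw [List.length_drop]; omega)).mp hM'
    have := h3 kw hm hp
    omega
  · rw [if_neg hb]
    rcases h2 with h2 | ⟨kw, hm, hl, hp⟩
    · exact absurd h2 hb
    · have hble : tswBestB w known i ≤ (w.drop i).length := by
        rw [← hl]; exact hp.length_le
      have hM : tswM w known i (tswBestB w known i) = true :=
        (tswM_iff w known i _ hble).mpr ⟨kw, hm, hl, hp⟩
      apply tswFindA_finds w known i (i + tswBestB w known i) (by omega)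
        (by rwa [Nat.add_sub_cancel_left])
      · rw [List.length_drop] at hble; omega
      · intro k hk hk'
        by_contra hM'
        have hM'' : tswM w known i (k - i) = true := by
          cases h : tswM w known i (k - i) with
          | false => exact absurd h hM'
          | true => rfl
        obtain ⟨kw', hm', hl', hp'⟩ := (tswM_iff w known i (k - i)
          (by rw [List.length_drop]; omega)).mp hM''
        have := h3 kw' hm' hp'
        omega

theorem loops_eq (w : List Char) (known : List String) :
    ∀ d i splits, w.length - i ≤ d → tswLoopA w known i splits = tswLoopB w known i splits := by
  intro d
  induction d with
  | zero =>
    intro i splits hd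
    rw [tswLoopA, tswLoopB]
    rw [dif_neg (by omega), dif_neg (by omega)]
  | succ d ih =>
    intro i splits hd
    rw [tswLoopA, tswLoopB]
    by_cases hi : i < w.length
    · rw [dif_pos hi, dif_pos hi]
      have hfe := find_eq_best w known i hi
      by_cases hb : tswBestB w known i = 0
      · rw [if_pos hb] at hfe
        rw [dif_pos hb]
        split
        · next j heq => rw [heq] at hfe; cases hfe
        · rfl
      · rw [if_neg hb] at hfe
        rw [dif_neg hb]
        split
        · next j heq =>
            rw [heq] at hfe
            cases hfe
            exact ih (i + tswBestB w known i) _ (by omega)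
        · next heq => rw [heq] at hfe; cases hfe
    · rw [dif_neg hi, dif_neg hi]

-- ===== VERDICT (by name: the statement is the Claim_ definition above) =====
theorem try_split_word_spec : Claim_equal_try_split_word := by
  intro word known _
  unfold Spec_try_split_word try_split_word try_split_word_alt
  exact loops_eq word.toList known (word.toList.length) 0 [] (by omega)
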